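-- pv_equiv track=rewrite | github.com/dila1001/nfkl-deck-selector | api/repositories/seasons.py | __valid_round_type_order
-- ===== SOURCE A (Python) =====
-- __valid_round_type = ['ban','safe','game']
--
-- def __valid_round_type_order(round_type_order: str):
--     end_is_last = False
--     for round_type in round_type_order.split(','):
--         if end_is_last: return False
--
--         if round_type.lower() in __valid_round_type: continue
--         if round_type.lower() == 'end':
--             end_is_last = True
--             continue
--         return False
--     return end_is_last
-- ===== SOURCE B (Python) =====
-- __valid_round_type = ['ban','safe','game']
--
-- def __valid_round_type_order(round_type_order: str):
--     tokens = round_type_order.split(',')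
--     return tokens[-1].lower() == 'end' and all(
--         t.lower() in __valid_round_type for t in tokens[:-1])
-- ===== Notes on version B (the rewrite author's own statement) =====
-- stated objective: simpler
-- what changed: Replaces the short-circuit state machine carrying an end_is_last flag through the loop with a positional decomposition: the last token must be the terminator and every token before it must be a valid round type.
import Mathlib
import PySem

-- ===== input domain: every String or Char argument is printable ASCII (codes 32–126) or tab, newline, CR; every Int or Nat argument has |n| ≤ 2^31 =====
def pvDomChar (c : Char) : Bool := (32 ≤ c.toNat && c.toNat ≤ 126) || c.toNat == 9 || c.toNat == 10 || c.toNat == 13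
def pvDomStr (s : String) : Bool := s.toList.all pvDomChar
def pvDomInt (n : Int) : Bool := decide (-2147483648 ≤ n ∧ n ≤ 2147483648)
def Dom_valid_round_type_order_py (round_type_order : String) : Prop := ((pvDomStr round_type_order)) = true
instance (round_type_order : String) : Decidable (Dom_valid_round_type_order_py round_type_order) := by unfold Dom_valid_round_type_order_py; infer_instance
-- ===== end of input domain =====

-- B replaces A's carried end_is_last flag with a positional check (last token is 'end',
-- all earlier tokens valid); objective: simpler.

-- ===== PORT A =====
def pvValidRoundType : List String := ["ban", "safe", "game"]

-- the for-loop with its early returns and the carried flag, as structural recursion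
def pvLoopA : List String → Bool → Bool
  | [], end_is_last => end_is_last
  | round_type :: rest, end_is_last =>
    if end_is_last then false
    else if pvValidRoundType.contains (PySem.Str.lower round_type) then pvLoopA rest end_is_last
    else if PySem.Str.lower round_type == "end" then pvLoopA rest true
    else false

def valid_round_type_order_py (round_type_order : String) : Bool :=
  pvLoopA ((PySem.Str.split? round_type_order ",").getD []) false

-- ===== PORT B =====
def valid_round_type_order_py_alt (round_type_order : String) : Bool :=
  let tokens := (PySem.Str.split? round_type_order ",").getD []
  ((PySem.List.pyGet? tokens (-1)).map PySem.Str.lower == some "end")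
    && (PySem.List.slice tokens none (some (-1))).all
         (fun t => pvValidRoundType.contains (PySem.Str.lower t))

-- ===== PRECONDITION & SPEC =====
def Spec_valid_round_type_order_py (round_type_order : String) (out : Bool) : Prop := out = valid_round_type_order_py_alt round_type_order
instance (round_type_order : String) (out : Bool) : Decidable (Spec_valid_round_type_order_py round_type_order out) := by unfold Spec_valid_round_type_order_py; infer_instance

-- ===== CLAIM (what is proved, stated in full; the proofs are below) =====
def Claim_equal_valid_round_type_order_py : Prop := ∀ (round_type_order : String), Dom_valid_round_type_order_py round_type_order → Spec_valid_round_type_order_py round_type_order (valid_round_type_order_py round_type_order)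

-- ===== LEMMAS AND PROOFS =====

lemma pvLoopA_true (ts : List String) : pvLoopA ts true = ts.isEmpty := by
  cases ts <;> simp [pvLoopA]

lemma pvLoopA_false (ts : List String) :
    pvLoopA ts false =
      (((PySem.List.pyGet? ts (-1)).map PySem.Str.lower == some "end")
        && ts.dropLast.all (fun t => pvValidRoundType.contains (PySem.Str.lower t))) := by
  induction ts with
  | nil => simp [pvLoopA, PySem.List.pyGet?]
  | cons t ts ih =>
    by_cases hv : PySem.Str.lower t ∈ pvValidRoundType
    · rw [show pvLoopA (t :: ts) false = pvLoopA ts false by simp [pvLoopA, hv], ih]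
      have hne : PySem.Str.lower t ≠ "end" := by
        simp [pvValidRoundType] at hv
        rcases hv with h | h | h <;> simp [h]
      cases ts with
      | nil => simp [PySem.List.pyGet?, PySem.List.pyIdx?, hne]
      | cons t' ts' =>
        simp [PySem.List.pyGet?_neg_one, List.getLast?_cons_cons, hv]
    · by_cases he : PySem.Str.lower t = "end"
      · rw [he] at hv
        rw [show pvLoopA (t :: ts) false = pvLoopA ts true by simp [pvLoopA, hv, he],
          pvLoopA_true]
        cases ts with
        | nil => simp [PySem.List.pyGet?, PySem.List.pyIdx?, he]
        | cons t' ts' => simp [he, hv]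
      · rw [show pvLoopA (t :: ts) false = false by simp [pvLoopA, hv, he]]
        cases ts with
        | nil => simp [PySem.List.pyGet?, PySem.List.pyIdx?, he]
        | cons t' ts' => simp [hv]

-- ===== VERDICT (by name: the statement is the Claim_ definition above) =====
theorem valid_round_type_order_py_spec : Claim_equal_valid_round_type_order_py := by
  intro s _
  unfold Spec_valid_round_type_order_py valid_round_type_order_py valid_round_type_order_py_alt
  simp only [pvLoopA_false, PySem.List.slice_to_neg_one]
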